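-- pv_equiv track=rewrite | github.com/williamwarlick/RepoLine | scripts/latency_report.py | _plan_identity
-- ===== SOURCE A (Python) =====
-- from typing import Any
--
-- def _plan_identity(rows: list[dict[str, Any]]) -> str | None:
--     hashes = {str(row.get("plan_sha256") or "").strip() for row in rows}
--     if hashes == {""}:
--         return None
--     if len(hashes) != 1 or "" in hashes:
--         raise ValueError(
--             "Latency report requires exactly one plan_sha256 when plan fingerprints are present."
--         )
--     return next(iter(hashes))
-- ===== SOURCE B (Python) =====
-- def _plan_identity(rows):
--     plan = None
--     saw_any = False
--     saw_empty = False
--     for row in rows: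
--         h = str(row.get("plan_sha256") or "").strip()
--         saw_any = True
--         if h == "":
--             saw_empty = True
--         elif plan is None:
--             plan = h
--         elif h != plan:
--             raise ValueError(
--                 "Latency report requires exactly one plan_sha256 when plan fingerprints are present."
--             )
--     if not saw_any or (plan is not None and saw_empty):
--         raise ValueError(
--             "Latency report requires exactly one plan_sha256 when plan fingerprints are present."
--         )
--     return plan
-- ===== Notes on version B (the rewrite author's own statement) =====
-- stated objective: alternative
-- what changed: Replaces the set comprehension plus post-hoc set-shape tests with a single pass maintaining a scalar candidate hash and two booleans (saw_any/saw_empty), raising the same ValueError inline or after the loop.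
import Mathlib
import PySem

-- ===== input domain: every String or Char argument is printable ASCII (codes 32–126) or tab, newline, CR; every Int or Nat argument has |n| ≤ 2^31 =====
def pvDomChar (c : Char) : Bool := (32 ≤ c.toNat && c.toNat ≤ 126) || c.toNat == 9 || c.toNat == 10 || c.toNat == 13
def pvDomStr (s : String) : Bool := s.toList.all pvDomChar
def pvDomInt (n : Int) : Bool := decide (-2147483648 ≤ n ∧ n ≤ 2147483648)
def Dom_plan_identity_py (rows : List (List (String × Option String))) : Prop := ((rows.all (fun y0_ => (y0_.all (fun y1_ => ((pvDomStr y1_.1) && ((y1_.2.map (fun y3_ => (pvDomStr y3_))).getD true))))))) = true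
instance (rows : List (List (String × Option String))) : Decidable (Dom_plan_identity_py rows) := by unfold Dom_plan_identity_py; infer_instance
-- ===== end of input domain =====

-- B replaces A's set comprehension + set-shape tests by a single pass keeping a scalar
-- candidate hash and saw_any/saw_empty flags (objective: alternative, same cost).


-- shared helper: str(row.get("plan_sha256") or "").strip()  (both Pythons compute this per row)
def pvHash (row : List (String × Option String)) : String :=
  PySem.Str.strip (((row.lookup "plan_sha256").getD none).getD "")  -- row.get: first match per the assoc-list convention

-- ===== PORT A =====
def plan_identity_py (rows : List (List (String × Option String))) : Option String :=
  let hashes : PySem.Set String := PySem.Set.ofList (rows.map pvHash)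
  if PySem.Set.equal hashes (PySem.Set.ofList [""]) then none
  else if hashes.length ≠ 1 ∨ "" ∈ hashes then none  -- Python: raise ValueError (excluded by Pre_)
  else hashes.head?  -- next(iter(hashes)); order-independent here: the set is a singleton

-- ===== PORT B =====
-- state = (plan, saw_any, saw_empty)
def pvStepB (st : Option String × Bool × Bool) (row : List (String × Option String)) :
    Option String × Bool × Bool :=
  let h := pvHash row
  if h = "" then (st.1, true, true)
  else if st.1 = none then (some h, true, st.2.2)
  else (st.1, true, st.2.2)  -- Python: if h ≠ plan, raise ValueError (excluded by Pre_)

def plan_identity_py_alt (rows : List (List (String × Option String))) : Option String :=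
  let st := rows.foldl pvStepB (none, false, false)
  if st.2.1 = false ∨ (st.1 ≠ none ∧ st.2.2 = true) then none  -- Python: raise ValueError (excluded by Pre_)
  else st.1

-- ===== PRECONDITION & SPEC =====
-- Pre_ excludes exactly the inputs on which A (and B) raise ValueError: empty rows, or two
-- rows whose stripped plan hashes differ (in particular an empty and a non-empty one).
def Pre_plan_identity_py (rows : List (List (String × Option String))) : Prop :=
  rows ≠ [] ∧ ∀ row ∈ rows, pvHash row = (rows.map pvHash).headD ""
instance (rows : List (List (String × Option String))) : Decidable (Pre_plan_identity_py rows) := by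
  unfold Pre_plan_identity_py; infer_instance
def pvWitness_plan_identity_py : (List (List (String × Option String))) := [[("plan_sha256", some "a")]]
def Spec_plan_identity_py (rows : List (List (String × Option String))) (out : Option String) : Prop := out = plan_identity_py_alt rows
instance (rows : List (List (String × Option String))) (out : Option String) : Decidable (Spec_plan_identity_py rows out) := by unfold Spec_plan_identity_py; infer_instance

-- ===== CLAIM (what is proved, stated in full; the proofs are below) =====
def Claim_equal_plan_identity_py : Prop := ∀ (rows : List (List (String × Option String))), Dom_plan_identity_py rows → Pre_plan_identity_py rows → Spec_plan_identity_py rows (plan_identity_py rows)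

-- ===== LEMMAS AND PROOFS =====

theorem foldl_add_const {c : String} : ∀ (t : List String), (∀ h ∈ t, h = c) →
    t.foldl PySem.Set.add [c] = [c] := by
  intro t
  induction t with
  | nil => intro _; rfl
  | cons a t ih =>
    intro hall
    have ha : a = c := hall a (List.mem_cons_self)
    have hstep : PySem.Set.add [c] a = [c] := by
      subst ha; simp [PySem.Set.add, PySem.Set.contains]
    simpa [List.foldl_cons, hstep] using ih (fun h hh => hall h (List.mem_cons_of_mem _ hh))

-- set(l) for a nonempty constant list l is the singleton [c]
theorem ofList_const {c : String} {l : List String} (hne : l ≠ [])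
    (hall : ∀ h ∈ l, h = c) : PySem.Set.ofList l = [c] := by
  cases l with
  | nil => exact absurd rfl hne
  | cons a t =>
    have ha : a = c := hall a (List.mem_cons_self)
    rw [PySem.Set.ofList_eq_foldl, List.foldl_cons]
    have h0 : PySem.Set.add [] a = [c] := by subst ha; rfl
    rw [h0]
    exact foldl_add_const t (fun h hh => hall h (List.mem_cons_of_mem _ hh))

theorem foldB_const_empty {rows : List (List (String × Option String))}
    (hall : ∀ row ∈ rows, pvHash row = "") :
    rows.foldl pvStepB (none, true, true) = (none, true, true) := by
  induction rows with
  | nil => rfl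
  | cons r rs ih =>
    have hr : pvHash r = "" := hall r (List.mem_cons_self)
    have hstep : pvStepB (none, true, true) r = (none, true, true) := by
      simp [pvStepB, hr]
    rw [List.foldl_cons, hstep]
    exact ih (fun row hh => hall row (List.mem_cons_of_mem _ hh))

theorem foldB_const_ne {c : String} (hc : c ≠ "") {rows : List (List (String × Option String))}
    (hall : ∀ row ∈ rows, pvHash row = c) :
    rows.foldl pvStepB (some c, true, false) = (some c, true, false) := by
  induction rows with
  | nil => rfl
  | cons r rs ih =>
    have hr : pvHash r = c := hall r (List.mem_cons_self)
    have hstep : pvStepB (some c, true, false) r = (some c, true, false) := by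
      simp [pvStepB, hr, hc]
    rw [List.foldl_cons, hstep]
    exact ih (fun row hh => hall row (List.mem_cons_of_mem _ hh))

-- ===== VERDICT (by name: the statement is the Claim_ definition above) =====
theorem plan_identity_py_spec : Claim_equal_plan_identity_py := by
  intro rows _ hpre
  obtain ⟨hne, hall⟩ := hpre
  unfold Spec_plan_identity_py
  cases rows with
  | nil => exact absurd rfl hne
  | cons r rs =>
    have hall' : ∀ row ∈ r :: rs, pvHash row = pvHash r := by
      intro row hh; rw [hall row hh]; simp
    have halls : ∀ row ∈ rs, pvHash row = pvHash r :=
      fun row hh => hall' row (List.mem_cons_of_mem _ hh)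
    have hmap : ∀ h ∈ (r :: rs).map pvHash, h = pvHash r := by
      intro h hh
      obtain ⟨row, hrow, rfl⟩ := List.mem_map.mp hh
      exact hall' row hrow
    have hset : PySem.Set.ofList ((r :: rs).map pvHash) = [pvHash r] :=
      ofList_const (by simp) hmap
    by_cases hc : pvHash r = ""
    · -- all hashes empty: both return none
      have hA : plan_identity_py (r :: rs) = none := by
        simp only [plan_identity_py, hset, hc]
        decide
      have hstep : pvStepB (none, false, false) r = (none, true, true) := by
        simp [pvStepB, hc]
      have hB : plan_identity_py_alt (r :: rs) = none := by
        have he : ∀ row ∈ rs, pvHash row = "" := fun row hh => (halls row hh).trans hc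
        simp [plan_identity_py_alt, List.foldl_cons, hstep, foldB_const_empty he]
      rw [hA, hB]
    · -- all hashes equal to the nonempty hash of the first row: both return it
      have hequal : ¬ (PySem.Set.equal [pvHash r] (PySem.Set.ofList [""]) = true) := by
        intro h
        have := (PySem.Set.equal_iff _ _).mp h (pvHash r)
        simp at this
        exact absurd this hc
      have hA : plan_identity_py (r :: rs) = some (pvHash r) := by
        simp only [plan_identity_py, hset]
        rw [if_neg hequal, if_neg (by simp [hc])]
        rfl
      have hstep : pvStepB (none, false, false) r = (some (pvHash r), true, false) := by
        simp [pvStepB, hc]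
      have hB : plan_identity_py_alt (r :: rs) = some (pvHash r) := by
        simp [plan_identity_py_alt, List.foldl_cons, hstep, foldB_const_ne hc halls]
      rw [hA, hB]
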